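-- pv_equiv track=rewrite | github.com/huohua325/xxq_car | xxq_host/src/slam/occupancy_map.py | _ray_trace
-- ===== SOURCE A (Python) =====
-- from typing import Tuple, List, Optional
--
-- def _ray_trace(x0: int, y0: int, x1: int, y1: int) -> List[Tuple[int, int]]:
--     """Bresenham射线追踪算法
--
--     生成从(x0, y0)到(x1, y1)的所有栅格坐标
--
--     Args:
--         x0, y0: 起点栅格坐标
--         x1, y1: 终点栅格坐标
--
--     Returns:
--         途径的栅格坐标列表
--     """
--     cells = []
--
--     dx = abs(x1 - x0)
--     dy = abs(y1 - y0)
--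
--     sx = 1 if x0 < x1 else -1
--     sy = 1 if y0 < y1 else -1
--
--     err = dx - dy
--
--     x, y = x0, y0
--
--     while True:
--         cells.append((x, y))
--
--         if x == x1 and y == y1:
--             break
--
--         e2 = 2 * err
--
--         if e2 > -dy:
--             err -= dy
--             x += sx
--
--         if e2 < dx:
--             err += dx
--             y += sy
--
--     return cells
-- ===== SOURCE B (Python) =====
-- from typing import Tuple, List
--
-- def _ray_trace(x0: int, y0: int, x1: int, y1: int) -> List[Tuple[int, int]]:
--     """Single-driving-axis Bresenham: one for-loop along the major axis."""
--     dx = abs(x1 - x0)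
--     dy = abs(y1 - y0)
--     sx = 1 if x0 < x1 else -1
--     sy = 1 if y0 < y1 else -1
--
--     cells = []
--     x, y = x0, y0
--     err = dx - dy
--     if dx >= dy:
--         for _ in range(dx + 1):
--             cells.append((x, y))
--             if 2 * err < dx:
--                 err += dx
--                 y += sy
--             err -= dy
--             x += sx
--     else:
--         for _ in range(dy + 1):
--             cells.append((x, y))
--             if 2 * err > -dy:
--                 err -= dy
--                 x += sx
--             err += dx
--             y += sy
--     return cells
-- ===== Notes on version B (the rewrite author's own statement) =====
-- stated objective: alternative
-- what changed: Replaces A's single while-loop that tests both axes independently each step with a single-driving-axis Bresenham: a counted for-loop over the major axis (shallow vs steep branch) that always advances the major coordinate and conditionally advances the minor one on the same error test.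
import Mathlib
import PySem

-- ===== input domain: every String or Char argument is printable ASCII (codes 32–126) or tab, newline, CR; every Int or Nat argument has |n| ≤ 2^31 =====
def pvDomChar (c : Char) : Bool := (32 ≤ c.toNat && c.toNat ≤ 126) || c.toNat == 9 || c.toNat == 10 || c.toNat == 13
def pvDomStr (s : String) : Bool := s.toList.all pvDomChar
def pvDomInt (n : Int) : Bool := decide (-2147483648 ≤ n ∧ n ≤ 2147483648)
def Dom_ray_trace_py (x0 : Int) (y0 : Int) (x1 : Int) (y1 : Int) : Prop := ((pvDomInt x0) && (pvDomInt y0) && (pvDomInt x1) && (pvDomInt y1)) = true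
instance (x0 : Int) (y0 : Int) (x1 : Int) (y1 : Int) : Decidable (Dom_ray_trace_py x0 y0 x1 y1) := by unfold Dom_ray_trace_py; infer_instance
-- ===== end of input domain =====

-- B replaces A's two independent per-step axis tests inside one while-loop by a
-- single-driving-axis Bresenham: a counted for-loop along the major axis (shallow
-- vs steep branch) that always advances the major coordinate and advances the
-- minor one on the same error test; same output, same O(max(dx,dy)) cost.

-- ===== PORT A =====
-- A's `while True` loop; the fuel (dx+dy)+1 only makes the recursion structural,
-- it is never exhausted on any input (the loop takes max(dx,dy)+1 iterations).
def rayLoopA (x1 y1 dx dy sx sy : Int) : Nat → Int → Int → Int → List (Int × Int) → List (Int × Int)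
  | 0, _, _, _, acc => acc
  | fuel+1, x, y, err, acc =>
    if x = x1 ∧ y = y1 then acc ++ [(x, y)]
    else
      rayLoopA x1 y1 dx dy sx sy fuel
        (if 2 * err > -dy then x + sx else x)
        (if 2 * err < dx then y + sy else y)
        (if 2 * err < dx then (if 2 * err > -dy then err - dy else err) + dx
         else (if 2 * err > -dy then err - dy else err))
        (acc ++ [(x, y)])

def ray_trace_py (x0 : Int) (y0 : Int) (x1 : Int) (y1 : Int) : List (Int × Int) :=
  rayLoopA x1 y1 (|x1 - x0|) (|y1 - y0|)
    (if x0 < x1 then 1 else -1) (if y0 < y1 then 1 else -1)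
    ((|x1 - x0| + |y1 - y0|).toNat + 1) x0 y0 (|x1 - x0| - |y1 - y0|) []

-- ===== PORT B =====
-- B's shallow branch: `for _ in range(dx+1)` along x, stepping y on 2*err < dx.
def rayShallow (dx dy sx sy : Int) : Nat → Int → Int → Int → List (Int × Int)
  | 0, _, _, _ => []
  | k+1, x, y, err =>
    (x, y) ::
      (if 2 * err < dx then rayShallow dx dy sx sy k (x + sx) (y + sy) (err + dx - dy)
       else rayShallow dx dy sx sy k (x + sx) y (err - dy))

-- B's steep branch: `for _ in range(dy+1)` along y, stepping x on 2*err > -dy.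
def raySteep (dx dy sx sy : Int) : Nat → Int → Int → Int → List (Int × Int)
  | 0, _, _, _ => []
  | k+1, x, y, err =>
    (x, y) ::
      (if 2 * err > -dy then raySteep dx dy sx sy k (x + sx) (y + sy) (err - dy + dx)
       else raySteep dx dy sx sy k x (y + sy) (err + dx))

def ray_trace_py_alt (x0 : Int) (y0 : Int) (x1 : Int) (y1 : Int) : List (Int × Int) :=
  if |y1 - y0| ≤ |x1 - x0| then
    rayShallow (|x1 - x0|) (|y1 - y0|)
      (if x0 < x1 then 1 else -1) (if y0 < y1 then 1 else -1)
      ((|x1 - x0|).toNat + 1) x0 y0 (|x1 - x0| - |y1 - y0|)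
  else
    raySteep (|x1 - x0|) (|y1 - y0|)
      (if x0 < x1 then 1 else -1) (if y0 < y1 then 1 else -1)
      ((|y1 - y0|).toNat + 1) x0 y0 (|x1 - x0| - |y1 - y0|)

-- ===== PRECONDITION & SPEC =====
def Spec_ray_trace_py (x0 : Int) (y0 : Int) (x1 : Int) (y1 : Int) (out : List (Int × Int)) : Prop := out = ray_trace_py_alt x0 y0 x1 y1
instance (x0 : Int) (y0 : Int) (x1 : Int) (y1 : Int) (out : List (Int × Int)) : Decidable (Spec_ray_trace_py x0 y0 x1 y1 out) := by unfold Spec_ray_trace_py; infer_instance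

-- ===== CLAIM (what is proved, stated in full; the proofs are below) =====
def Claim_equal_ray_trace_py : Prop := ∀ (x0 : Int) (y0 : Int) (x1 : Int) (y1 : Int), Dom_ray_trace_py x0 y0 x1 y1 → Spec_ray_trace_py x0 y0 x1 y1 (ray_trace_py x0 y0 x1 y1)

-- ===== LEMMAS AND PROOFS =====

-- Loop invariant for the shallow case (dy ≤ dx): n/p are the remaining x/y steps,
-- err is pinned to 2*err = q + 2dx - 2dy with q = 2(n*dy - p*dx), and while n > 0
-- we have dy - 2dx < q < dx, which makes A's x-branch fire every iteration.
lemma shallow_eq (x1 y1 dx dy sx sy : Int) (hdy : 0 ≤ dy) (hdd : dy ≤ dx)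
    (hsx : sx ≠ 0) (hsy : sy ≠ 0) :
    ∀ (n : Nat), ∀ (p fuel : Nat) (x y err : Int) (acc : List (Int × Int)),
      n < fuel → p ≤ n → (n : Int) ≤ dx →
      x1 = x + (n : Int) * sx → y1 = y + (p : Int) * sy →
      2 * err = 2 * ((n : Int) * dy - (p : Int) * dx) + 2 * dx - 2 * dy →
      (0 < n → dy - 2 * dx < 2 * ((n : Int) * dy - (p : Int) * dx) ∧
               2 * ((n : Int) * dy - (p : Int) * dx) < dx) →
      rayLoopA x1 y1 dx dy sx sy fuel x y err acc = acc ++ rayShallow dx dy sx sy (n + 1) x y err := by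
  intro n
  induction n with
  | zero =>
    intro p fuel x y err acc hfuel hpn hndx hx1 hy1 herr hbnd
    obtain rfl : p = 0 := Nat.le_zero.mp hpn
    cases fuel with
    | zero => omega
    | succ f =>
      have hx : x = x1 := by push_cast at hx1; linarith
      have hy : y = y1 := by push_cast at hy1; linarith
      simp [rayLoopA, rayShallow, hx, hy]
  | succ m ih =>
    intro p fuel x y err acc hfuel hpn hndx hx1 hy1 herr hbnd
    cases fuel with
    | zero => omega
    | succ f =>
      push_cast at hx1 hy1 herr hndx
      obtain ⟨hlow, hup⟩ := hbnd (Nat.succ_pos m)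
      push_cast at hlow hup
      have hm0 : (0:Int) ≤ (m : Int) := Int.natCast_nonneg m
      have hdxpos : (0:Int) < dx := by linarith
      have hxne : ¬(x = x1 ∧ y = y1) := by
        rintro ⟨hx, -⟩
        have h0 : ((m:Int) + 1) * sx = 0 := by
          have := hx1; rw [← hx] at this; linarith
        rcases mul_eq_zero.mp h0 with h | h
        · linarith
        · exact hsx h
      have hA : 2 * err > -dy := by linarith
      simp only [rayLoopA]
      rw [if_neg hxne]
      by_cases hc : 2 * err < dx
      · -- y advances
        have hp0 : 0 < p := by
          rcases Nat.eq_zero_or_pos p with rfl | h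
          · exfalso
            push_cast at herr
            have hprod : (0:Int) ≤ (m : Int) * dy := mul_nonneg hm0 hdy
            nlinarith
          · exact h
        obtain ⟨pp, rfl⟩ : ∃ pp, p = pp + 1 := ⟨p - 1, by omega⟩
        push_cast at hy1 herr hlow hup
        rw [if_pos hA, if_pos hc, if_pos hc, if_pos hA]
        conv_rhs => rw [rayShallow]
        rw [if_pos hc]
        have herr2 : err + dx - dy = err - dy + dx := by ring
        rw [herr2]
        have := ih pp f (x + sx) (y + sy) (err - dy + dx) (acc ++ [(x, y)])
          (by omega) (by omega) (by linarith)
          (by push_cast; linarith) (by push_cast; linarith)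
          (by push_cast; linarith)
          (by intro hm; push_cast; constructor <;> linarith)
        rw [this]
        simp
      · -- y does not advance
        have hcc : dx ≤ 2 * err := by linarith
        have hplt : p ≤ m := by
          by_contra hgt
          obtain rfl : p = m + 1 := by omega
          push_cast at herr
          have hprod : (0:Int) ≤ (m : Int) * (dx - dy) := mul_nonneg hm0 (by linarith)
          nlinarith
        rw [if_pos hA, if_neg hc, if_neg hc, if_pos hA]
        conv_rhs => rw [rayShallow]
        rw [if_neg hc]
        have := ih p f (x + sx) y (err - dy) (acc ++ [(x, y)])
          (by omega) (by omega) (by linarith)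
          (by push_cast; linarith) (by push_cast; linarith)
          (by push_cast; linarith)
          (by intro hm; push_cast; constructor <;> linarith)
        rw [this]
        simp

-- Loop invariant for the steep case (dx < dy), mirror image of shallow_eq:
-- while p > 0 we have -dy < q < 2dy - dx, so A's y-branch fires every iteration.
lemma steep_eq (x1 y1 dx dy sx sy : Int) (hdx : 0 ≤ dx) (hdd : dx < dy)
    (hsx : sx ≠ 0) (hsy : sy ≠ 0) :
    ∀ (p : Nat), ∀ (n fuel : Nat) (x y err : Int) (acc : List (Int × Int)),
      p < fuel → n ≤ p → (p : Int) ≤ dy →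
      x1 = x + (n : Int) * sx → y1 = y + (p : Int) * sy →
      2 * err = 2 * ((n : Int) * dy - (p : Int) * dx) + 2 * dx - 2 * dy →
      (0 < p → -dy < 2 * ((n : Int) * dy - (p : Int) * dx) ∧
               2 * ((n : Int) * dy - (p : Int) * dx) < 2 * dy - dx) →
      rayLoopA x1 y1 dx dy sx sy fuel x y err acc = acc ++ raySteep dx dy sx sy (p + 1) x y err := by
  intro p
  induction p with
  | zero =>
    intro n fuel x y err acc hfuel hnp hpdy hx1 hy1 herr hbnd
    obtain rfl : n = 0 := Nat.le_zero.mp hnp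
    cases fuel with
    | zero => omega
    | succ f =>
      have hx : x = x1 := by push_cast at hx1; linarith
      have hy : y = y1 := by push_cast at hy1; linarith
      simp [rayLoopA, raySteep, hx, hy]
  | succ m ih =>
    intro n fuel x y err acc hfuel hnp hpdy hx1 hy1 herr hbnd
    cases fuel with
    | zero => omega
    | succ f =>
      push_cast at hx1 hy1 herr hpdy
      obtain ⟨hlow, hup⟩ := hbnd (Nat.succ_pos m)
      push_cast at hlow hup
      have hm0 : (0:Int) ≤ (m : Int) := Int.natCast_nonneg m
      have hdypos : (0:Int) < dy := by linarith
      have hyne : ¬(x = x1 ∧ y = y1) := by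
        rintro ⟨-, hy⟩
        have h0 : ((m:Int) + 1) * sy = 0 := by
          have := hy1; rw [← hy] at this; linarith
        rcases mul_eq_zero.mp h0 with h | h
        · linarith
        · exact hsy h
      have hc : 2 * err < dx := by linarith
      simp only [rayLoopA]
      rw [if_neg hyne]
      by_cases hb : 2 * err > -dy
      · -- x advances
        have hn0 : 0 < n := by
          rcases Nat.eq_zero_or_pos n with rfl | h
          · exfalso
            push_cast at herr
            have hprod : (0:Int) ≤ (m : Int) * dx := mul_nonneg hm0 hdx
            nlinarith
          · exact h
        obtain ⟨nn, rfl⟩ : ∃ nn, n = nn + 1 := ⟨n - 1, by omega⟩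
        push_cast at hx1 herr hlow hup
        rw [if_pos hb, if_pos hc, if_pos hc, if_pos hb]
        conv_rhs => rw [raySteep]
        rw [if_pos hb]
        have := ih nn f (x + sx) (y + sy) (err - dy + dx) (acc ++ [(x, y)])
          (by omega) (by omega) (by linarith)
          (by push_cast; linarith) (by push_cast; linarith)
          (by push_cast; linarith)
          (by intro hm; push_cast; constructor <;> linarith)
        rw [this]
        simp
      · -- x does not advance
        have hbb : 2 * err ≤ -dy := by linarith
        have hnlt : n ≤ m := by
          by_contra hgt
          obtain rfl : n = m + 1 := by omega
          push_cast at herr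
          have hprod : (0:Int) ≤ (m : Int) * (dy - dx) := mul_nonneg hm0 (by linarith)
          nlinarith
        rw [if_neg hb, if_pos hc, if_pos hc, if_neg hb]
        conv_rhs => rw [raySteep]
        rw [if_neg hb]
        have := ih n f x (y + sy) (err + dx) (acc ++ [(x, y)])
          (by omega) (by omega) (by linarith)
          (by push_cast; linarith) (by push_cast; linarith)
          (by push_cast; linarith)
          (by intro hm; push_cast; constructor <;> linarith)
        rw [this]
        simp

lemma ray_eq (x0 y0 x1 y1 : Int) : ray_trace_py x0 y0 x1 y1 = ray_trace_py_alt x0 y0 x1 y1 := by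
  have hdxnn : (0:Int) ≤ |x1 - x0| := abs_nonneg _
  have hdynn : (0:Int) ≤ |y1 - y0| := abs_nonneg _
  have hsx : (if x0 < x1 then (1:Int) else -1) ≠ 0 := by split <;> norm_num
  have hsy : (if y0 < y1 then (1:Int) else -1) ≠ 0 := by split <;> norm_num
  have hxs : x1 = x0 + |x1 - x0| * (if x0 < x1 then (1:Int) else -1) := by
    split
    · rw [abs_of_pos (by linarith : (0:Int) < x1 - x0)]; ring
    · rw [abs_of_nonpos (by linarith : x1 - x0 ≤ 0)]; ring
  have hys : y1 = y0 + |y1 - y0| * (if y0 < y1 then (1:Int) else -1) := by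
    split
    · rw [abs_of_pos (by linarith : (0:Int) < y1 - y0)]; ring
    · rw [abs_of_nonpos (by linarith : y1 - y0 ≤ 0)]; ring
  unfold ray_trace_py ray_trace_py_alt
  have hcx : ((|x1 - x0|).toNat : Int) = |x1 - x0| := Int.toNat_of_nonneg hdxnn
  have hcy : ((|y1 - y0|).toNat : Int) = |y1 - y0| := Int.toNat_of_nonneg hdynn
  by_cases h : |y1 - y0| ≤ |x1 - x0|
  · rw [if_pos h]
    have := shallow_eq x1 y1 (|x1 - x0|) (|y1 - y0|) _ _ hdynn h hsx hsy
      (|x1 - x0|).toNat (|y1 - y0|).toNat ((|x1 - x0| + |y1 - y0|).toNat + 1)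
      x0 y0 (|x1 - x0| - |y1 - y0|) []
      (by omega) (by omega) (by rw [hcx])
      (by rw [hcx]; exact hxs) (by rw [hcy]; exact hys)
      (by rw [hcx, hcy]; ring)
      (by intro hn
          have hdxpos : (0:Int) < |x1 - x0| := by omega
          rw [hcx, hcy]
          constructor <;> [skip; skip] <;> nlinarith [hdynn, hdxpos])
    simpa using this
  · rw [if_neg h]
    push Not at h
    have := steep_eq x1 y1 (|x1 - x0|) (|y1 - y0|) _ _ hdxnn h hsx hsy
      (|y1 - y0|).toNat (|x1 - x0|).toNat ((|x1 - x0| + |y1 - y0|).toNat + 1)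
      x0 y0 (|x1 - x0| - |y1 - y0|) []
      (by omega) (by omega) (by rw [hcy])
      (by rw [hcx]; exact hxs) (by rw [hcy]; exact hys)
      (by rw [hcx, hcy]; ring)
      (by intro hp
          have hdypos : (0:Int) < |y1 - y0| := by omega
          rw [hcx, hcy]
          constructor <;> nlinarith [hdxnn, hdypos])
    simpa using this

-- ===== VERDICT (by name: the statement is the Claim_ definition above) =====
theorem ray_trace_py_spec : Claim_equal_ray_trace_py := by
  intro x0 y0 x1 y1 _
  unfold Spec_ray_trace_py
  exact ray_eq x0 y0 x1 y1
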